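-- pv_equiv track=rewrite | github.com/JUNSEOK3759/BaekJoon_Coding_Test | 프로그래머스/lv2/17680. ［1차］ 캐시/［1차］ 캐시.py | solution
-- ===== SOURCE A (Python) =====
-- def solution(cacheSize, cities):
--     answer = 0
--     a = []
--     for i in cities:
--         i = i.lower()
--         if i not in a:
--             if len(a) < cacheSize:
--                 a.append(i)
--             else:
--                 a.append(i)
--                 a.pop(0)
--
--             answer += 5
--         else:
--             answer += 1
--             a.pop(a.index(i))
--             a.append(i)
--     return answer
-- ===== SOURCE B (Python) =====
-- def solution(cacheSize, cities):
--     answer = 0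
--     last = {}   # lowercased city -> last-access timestamp
--     t = 0
--     for city in cities:
--         c = city.lower()
--         if c in last:
--             answer += 1
--             last[c] = t
--         else:
--             answer += 5
--             if cacheSize > 0:
--                 if len(last) >= cacheSize:
--                     victim = min(last.items(), key=lambda kv: kv[1])[0]
--                     del last[victim]
--                 last[c] = t
--         t += 1
--     return answer
-- ===== Notes on version B (the rewrite author's own statement) =====
-- stated objective: alternative
-- what changed: Replaces A's recency-ordered list (linear membership scan, list.index, pop(0)/pop(i) queue shuffling per access) by a dict mapping each lowercased city to an integer last-access timestamp with a global clock: hits are hash lookups/updates and a miss-eviction does a min-timestamp scan; cacheSize<=0 is handled by never storing anything.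
import Mathlib
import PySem

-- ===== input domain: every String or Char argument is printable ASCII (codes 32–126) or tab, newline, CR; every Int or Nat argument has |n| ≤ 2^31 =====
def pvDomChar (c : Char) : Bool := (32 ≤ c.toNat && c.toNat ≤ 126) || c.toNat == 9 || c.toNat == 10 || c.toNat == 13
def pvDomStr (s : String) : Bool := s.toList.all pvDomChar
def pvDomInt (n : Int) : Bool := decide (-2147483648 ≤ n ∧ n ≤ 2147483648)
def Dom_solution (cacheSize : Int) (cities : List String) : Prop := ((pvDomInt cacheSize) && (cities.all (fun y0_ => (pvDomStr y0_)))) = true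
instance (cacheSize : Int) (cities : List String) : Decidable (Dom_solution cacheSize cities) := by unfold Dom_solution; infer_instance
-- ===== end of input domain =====

-- B replaces A's list-as-queue (with pop(0)/index scans) by a dict of last-access timestamps
-- with min-timestamp eviction; alternative data structure, same observable result.


-- ===== PORT A =====
-- loop body of A, lifted out of the fold (answer, a)
def stepA (cacheSize : Int) (st : Int × List String) (city : String) : Int × List String :=
  let i := PySem.Str.lower city
  if i ∉ st.2 then
    if (st.2.length : Int) < cacheSize then
      (st.1 + 5, st.2 ++ [i])
    else
      (st.1 + 5,
        match PySem.List.pop? (st.2 ++ [i]) 0 with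
        | some r => r.2
        | none => st.2 ++ [i])
  else
    (st.1 + 1,
      (match PySem.List.index? st.2 i with
       | some j =>
         (match PySem.List.pop? st.2 (j : Int) with
          | some r => r.2
          | none => st.2)
       | none => st.2) ++ [i])

def solution (cacheSize : Int) (cities : List String) : Int :=
  (cities.foldl (stepA cacheSize) (0, [])).1

-- ===== PORT B =====
-- loop body of B, lifted out of the fold (answer, last, t)
def stepB (cacheSize : Int) (st : Int × PySem.Dict String Int × Int) (city : String) : Int × PySem.Dict String Int × Int :=
  let c := PySem.Str.lower city
  let answer := st.1
  let last := st.2.1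
  let t := st.2.2
  if last.contains c then
    (answer + 1, last.insert c t, t + 1)
  else
    if 0 < cacheSize then
      let last1 :=
        if cacheSize ≤ (last.size : Int) then
          match PySem.List.min? last.items (fun kv => kv.2) with
          | some kv => last.erase kv.1
          | none => last
        else last
      (answer + 5, last1.insert c t, t + 1)
    else
      (answer + 5, last, t + 1)

def solution_alt (cacheSize : Int) (cities : List String) : Int :=
  (cities.foldl (stepB cacheSize) (0, PySem.Dict.empty, 0)).1

-- ===== PRECONDITION & SPEC =====
def Spec_solution (cacheSize : Int) (cities : List String) (out : Int) : Prop := out = solution_alt cacheSize cities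
instance (cacheSize : Int) (cities : List String) (out : Int) : Decidable (Spec_solution cacheSize cities out) := by unfold Spec_solution; infer_instance

-- ===== CLAIM (what is proved, stated in full; the proofs are below) =====
def Claim_equal_solution : Prop := ∀ (cacheSize : Int) (cities : List String), Dom_solution cacheSize cities → Spec_solution cacheSize cities (solution cacheSize cities)

-- ===== LEMMAS AND PROOFS =====

-- the coupling invariant: B's dict items are a permutation of A's recency list zipped with
-- strictly increasing timestamps, all below B's clock; A's list is duplicate-free and fits the cache
def LRUInv (cacheSize : Int) (sA : Int × List String) (sB : Int × PySem.Dict String Int × Int) : Prop :=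
  sA.1 = sB.1 ∧ ∃ st : List Int,
    sB.2.1.items.Perm (sA.2.zip st) ∧
    st.length = sA.2.length ∧
    st.Pairwise (· < ·) ∧
    (∀ x ∈ st, x < sB.2.2) ∧
    sA.2.Nodup ∧
    (sA.2.length : Int) ≤ max cacheSize 0

lemma mem_iff_contains (a : List String) (st : List Int) (d : PySem.Dict String Int)
    (hperm : d.items.Perm (a.zip st)) (hlen : st.length = a.length) (c : String) :
    d.contains c = true ↔ c ∈ a := by
  have hm : List.map (fun (x : String × Int) => x.1) (a.zip st) = a := by
    simpa using List.map_fst_zip (show a.length ≤ st.length by omega)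
  rw [PySem.Dict.contains_iff_mem_keys]
  simp only [PySem.Dict.keys]
  rw [(hperm.map (·.1)).mem_iff, hm]

lemma eraseIdx_append_cons {α : Type} (pre suf : List α) (c : α) :
    (pre ++ c :: suf).eraseIdx pre.length = pre ++ suf := by
  induction pre with
  | nil => rfl
  | cons x xs ih => simpa using ih

lemma split_at_len {α : Type} (l : List α) (n : Nat) (h : n < l.length) :
    ∃ l1 x l2, l = l1 ++ x :: l2 ∧ l1.length = n ∧ l2.length + n + 1 = l.length := by
  refine ⟨l.take n, l[n], l.drop (n + 1), ?_, ?_, ?_⟩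
  · rw [← List.drop_eq_getElem_cons h, List.take_append_drop]
  · simp; omega
  · simp; omega

lemma nodup_shift {α : Type} (pre suf : List α) (c : α) (h : (pre ++ c :: suf).Nodup) :
    ((pre ++ suf) ++ [c]).Nodup :=
  List.Perm.nodup ((List.perm_append_singleton c (pre ++ suf)).trans List.perm_middle.symm).symm h

lemma step_inv (cacheSize : Int) (sA : Int × List String) (sB : Int × PySem.Dict String Int × Int)
    (city : String) (h : LRUInv cacheSize sA sB) :
    LRUInv cacheSize (stepA cacheSize sA city) (stepB cacheSize sB city) := by
  obtain ⟨ansA, a⟩ := sA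
  obtain ⟨ansB, d, t⟩ := sB
  obtain ⟨hans, st, hperm, hlen, hpw, hlt, hnd, hsz⟩ := h
  simp only at hans hperm hlen hpw hlt hnd hsz
  simp only [stepA, stepB]
  generalize PySem.Str.lower city = c
  have hmem := mem_iff_contains a st d hperm hlen c
  have hsize : (d.size : Int) = (a.length : Int) := by
    have h1 : d.size = d.items.length := rfl
    have h2 := hperm.length_eq
    rw [List.length_zip] at h2
    simp [h1, h2]; omega
  by_cases hin : c ∈ a
  · -- HIT: c is cached; A moves it to the back, B stamps it with the clock
    have hcon : d.contains c = true := hmem.mpr hin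
    rw [if_neg (not_not_intro hin), if_pos hcon]
    obtain ⟨k, hk⟩ := Option.isSome_iff_exists.mp ((PySem.List.index?_isSome_iff a c).mpr hin)
    obtain ⟨pre, suf, ha, hprelen, hcpre⟩ := (PySem.List.index?_eq_some_iff a c k).mp hk
    have hcsuf : c ∉ suf := by
      rw [ha] at hnd
      exact (List.nodup_cons.mp hnd.of_append_right).1
    have hklt : k < a.length := by rw [ha]; simp; omega
    have hpop := PySem.List.pop?_natCast a k hklt
    have herase : a.eraseIdx k = pre ++ suf := by
      rw [ha, ← hprelen, eraseIdx_append_cons]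
    have hstlen : pre.length < st.length := by rw [hlen, ha]; simp
    obtain ⟨stp, s0, sts, hst, hstp, hsts⟩ := split_at_len st pre.length hstlen
    have hsufsts : sts.length = suf.length := by
      rw [hlen, ha] at hsts; simp at hsts; omega
    -- the new dict items, as a permutation of the new zip
    have hzip : a.zip st = pre.zip stp ++ (c, s0) :: suf.zip sts := by
      rw [ha, hst, List.zip_append hstp.symm, List.zip_cons_cons]
    have hmapf : List.map (fun p => if (p.1 == c) = true then (c, t) else p)
        (pre.zip stp ++ (c, s0) :: suf.zip sts)
        = pre.zip stp ++ (c, t) :: suf.zip sts := by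
      rw [List.map_append, List.map_cons]
      have e1 : ∀ p ∈ pre.zip stp, (if (p.1 == c) = true then (c, t) else p) = p := by
        intro p hp
        rw [if_neg]
        simp only [beq_iff_eq]
        exact fun h => hcpre (h ▸ (List.of_mem_zip hp).1)
      have e2 : ∀ p ∈ suf.zip sts, (if (p.1 == c) = true then (c, t) else p) = p := by
        intro p hp
        rw [if_neg]
        simp only [beq_iff_eq]
        exact fun h => hcsuf (h ▸ (List.of_mem_zip hp).1)
      rw [List.map_congr_left e1, List.map_congr_left e2]
      simp
    have hzip' : ((pre ++ suf) ++ [c]).zip ((stp ++ sts) ++ [t])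
        = (pre.zip stp ++ suf.zip sts) ++ [(c, t)] := by
      rw [List.zip_append (by simp; omega), List.zip_append hstp.symm]
      rfl
    simp only [hk, hpop, herase]
    refine ⟨by simp [hans], (stp ++ sts) ++ [t], ?_, ?_, ?_, ?_, ?_, ?_⟩
    · -- permutation
      show ((d.insert c t).items).Perm (((pre ++ suf) ++ [c]).zip ((stp ++ sts) ++ [t]))
      rw [PySem.Dict.items_insert_of_contains d t hcon, hzip']
      have hp1 : (List.map (fun p => if (p.1 == c) = true then (c, t) else p) d.items).Perm
          (pre.zip stp ++ (c, t) :: suf.zip sts) := by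
        have := hperm.map (fun p => if (p.1 == c) = true then (c, t) else p)
        rwa [hzip, hmapf] at this
      exact hp1.trans (List.perm_middle.trans (List.perm_append_singleton _ _).symm)
    · -- stamp list length
      show _ = ((pre ++ suf) ++ [c]).length
      simp
      omega
    · -- strictly increasing stamps
      show ((stp ++ sts) ++ [t]).Pairwise (· < ·)
      have hsub : (stp ++ sts).Sublist st := by
        rw [hst]
        exact List.Sublist.append (List.Sublist.refl _) (List.sublist_cons_self _ _)
      rw [List.pairwise_append]
      refine ⟨hpw.sublist hsub, List.pairwise_singleton _ _, ?_⟩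
      intro x hx y hy
      simp only [List.mem_singleton] at hy
      subst hy
      exact hlt x (hsub.subset hx)
    · -- stamps below the new clock
      intro x hx
      show x < t + 1
      simp only [List.mem_append, List.mem_singleton] at hx
      rcases hx with (hx | hx) | hx
      · have := hlt x (by rw [hst]; simp [hx]); omega
      · have := hlt x (by rw [hst]; simp [hx]); omega
      · omega
    · -- nodup
      show ((pre ++ suf) ++ [c]).Nodup
      rw [ha] at hnd
      exact nodup_shift pre suf c hnd
    · -- size bound
      show (((pre ++ suf) ++ [c]).length : Int) ≤ max cacheSize 0
      rw [ha] at hsz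
      simp at hsz ⊢
      omega
  · -- MISS
    have hcon : d.contains c = false := Bool.eq_false_iff.mpr (fun h => hin (hmem.mp h))
    rw [if_pos hin, if_neg (show ¬(d.contains c = true) by simp [hcon])]
    by_cases hroom : (a.length : Int) < cacheSize
    · -- room in the cache: both just add c
      have hpos : 0 < cacheSize := by omega
      rw [if_pos hroom, if_pos hpos, if_neg (show ¬cacheSize ≤ (d.size : Int) by omega)]
      refine ⟨by simp [hans], st ++ [t], ?_, ?_, ?_, ?_, ?_, ?_⟩
      · show ((d.insert c t).items).Perm ((a ++ [c]).zip (st ++ [t]))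
        rw [PySem.Dict.items_insert_of_not_contains d t hcon,
          List.zip_append (by omega)]
        exact hperm.append_right _
      · show _ = (a ++ [c]).length
        simp; omega
      · show (st ++ [t]).Pairwise (· < ·)
        rw [List.pairwise_append]
        exact ⟨hpw, List.pairwise_singleton _ _,
          fun x hx y hy => by simp only [List.mem_singleton] at hy; subst hy; exact hlt x hx⟩
      · intro x hx
        show x < t + 1
        rcases List.mem_append.mp hx with h | h
        · have := hlt x h; omega
        · simp only [List.mem_singleton] at h; omega
      · show (a ++ [c]).Nodup
        exact List.Perm.nodup (List.perm_append_singleton c a).symm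
          (List.nodup_cons.mpr ⟨hin, hnd⟩)
      · show ((a ++ [c]).length : Int) ≤ max cacheSize 0
        simp; omega
    · -- cache full (or disabled)
      rw [if_neg hroom]
      by_cases hpos : 0 < cacheSize
      · -- full, positive capacity: A pops the front, B evicts the min-stamp key
        have hfull : (a.length : Int) = cacheSize := by omega
        obtain ⟨h0, rest, rfl⟩ : ∃ h0 rest, a = h0 :: rest := by
          cases a with
          | nil => simp at hfull; omega
          | cons x xs => exact ⟨x, xs, rfl⟩
        obtain ⟨s0, sts, rfl⟩ : ∃ s0 sts, st = s0 :: sts := by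
          cases st with
          | nil => simp at hlen
          | cons x xs => exact ⟨x, xs, rfl⟩
        rw [if_pos hpos, if_pos (show cacheSize ≤ (d.size : Int) by omega)]
        -- A's side: pop(0) of a ++ [c]
        have hpopA : PySem.List.pop? ((h0 :: rest) ++ [c]) 0 = some (h0, rest ++ [c]) := by
          rw [List.cons_append]
          exact PySem.List.pop?_zero_cons _ _
        simp only [hpopA]
        -- identify B's eviction victim as (h0, s0)
        have hzip : (h0 :: rest).zip (s0 :: sts) = (h0, s0) :: rest.zip sts :=
          List.zip_cons_cons
        obtain ⟨m, hm⟩ : ∃ m, PySem.List.min? d.items (fun kv => kv.2) = some m := by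
          cases hmin : PySem.List.min? d.items (fun kv => kv.2) with
          | none =>
            have := (PySem.List.min?_eq_none_iff d.items _).mp hmin
            rw [this] at hperm
            have := hperm.symm.length_eq
            simp [hzip] at this
          | some m => exact ⟨m, rfl⟩
        have hmv : m = (h0, s0) := by
          have hmmem : m ∈ (h0, s0) :: rest.zip sts := by
            have := hperm.subset (PySem.List.min?_mem hm)
            rwa [hzip] at this
          have hhead : (h0, s0) ∈ d.items := hperm.symm.subset (by rw [hzip]; exact List.mem_cons_self ..)
          have h1 : m.2 ≤ s0 := PySem.List.min?_isMin hm _ hhead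
          rcases List.mem_cons.mp hmmem with h | h
          · exact h
          · exfalso
            have hs : m.2 ∈ sts := (List.of_mem_zip h).2
            have := (List.pairwise_cons.mp hpw).1 m.2 hs
            omega
        simp only [hm, hmv]
        -- the erased dict is a permutation of the tail zip
        have hnodup_rest : h0 ∉ rest := (List.nodup_cons.mp hnd).1
        have hermperm : ((d.erase h0).items).Perm (rest.zip sts) := by
          have heq : (d.erase h0).items = d.items.filter (fun p => !(p.1 == h0)) := rfl
          rw [heq]
          have hfil := hperm.filter (fun p => !(p.1 == h0))
          rw [hzip] at hfil
          have hkeep : ∀ p ∈ rest.zip sts, (!(p.1 == h0)) = true := by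
            intro p hp
            have hne : p.1 ≠ h0 := fun h => hnodup_rest (h ▸ (List.of_mem_zip hp).1)
            simp [hne]
          rw [List.filter_cons_of_neg (by simp), List.filter_eq_self.mpr hkeep] at hfil
          exact hfil
        have hlen' : sts.length = rest.length := by simp at hlen; omega
        have hconer : (d.erase h0).contains c = false := by
          have hmm := mem_iff_contains rest sts (d.erase h0) hermperm hlen' c
          exact Bool.eq_false_iff.mpr
            (fun h => hin (List.mem_cons_of_mem _ (hmm.mp h)))
        refine ⟨by simp [hans], sts ++ [t], ?_, ?_, ?_, ?_, ?_, ?_⟩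
        · show (((d.erase h0).insert c t).items).Perm ((rest ++ [c]).zip (sts ++ [t]))
          rw [PySem.Dict.items_insert_of_not_contains _ t hconer,
            List.zip_append (by omega)]
          exact hermperm.append_right _
        · show _ = (rest ++ [c]).length
          simp; omega
        · show (sts ++ [t]).Pairwise (· < ·)
          rw [List.pairwise_append]
          exact ⟨(List.pairwise_cons.mp hpw).2, List.pairwise_singleton _ _,
            fun x hx y hy => by
              simp only [List.mem_singleton] at hy; subst hy
              exact hlt x (List.mem_cons_of_mem _ hx)⟩
        · intro x hx
          show x < t + 1
          rcases List.mem_append.mp hx with h | h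
          · have := hlt x (List.mem_cons_of_mem _ h); omega
          · simp only [List.mem_singleton] at h; omega
        · show (rest ++ [c]).Nodup
          exact List.Perm.nodup (List.perm_append_singleton c rest).symm
            (List.nodup_cons.mpr ⟨fun h => hin (List.mem_cons_of_mem _ h),
              (List.nodup_cons.mp hnd).2⟩)
        · show ((rest ++ [c]).length : Int) ≤ max cacheSize 0
          simp at hfull ⊢; omega
      · -- capacity ≤ 0: A's append-then-pop leaves the empty list; B stores nothing
        have hempty : a = [] := by
          have : (a.length : Int) ≤ 0 := by
            have : max cacheSize 0 = 0 := by omega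
            omega
          simpa using (by omega : a.length = 0)
        subst hempty
        have hstnil : st = [] := List.length_eq_zero_iff.mp (by simpa using hlen)
        subst hstnil
        rw [if_neg hpos]
        have hpopA : PySem.List.pop? (([] : List String) ++ [c]) 0 = some (c, []) := by
          simp only [List.nil_append]
          exact PySem.List.pop?_zero_cons _ _
        simp only [hpopA]
        refine ⟨by simp [hans], [], by simpa using hperm, rfl, by simp, ?_, by simp, by simp⟩
        intro x hx
        simp at hx

lemma fold_inv (cacheSize : Int) (cities : List String) (sA : Int × List String)
    (sB : Int × PySem.Dict String Int × Int) (h : LRUInv cacheSize sA sB) :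
    LRUInv cacheSize (cities.foldl (stepA cacheSize) sA) (cities.foldl (stepB cacheSize) sB) := by
  induction cities generalizing sA sB with
  | nil => exact h
  | cons c cs ih => exact ih _ _ (step_inv _ _ _ _ h)

-- ===== VERDICT (by name: the statement is the Claim_ definition above) =====
theorem solution_spec : Claim_equal_solution := by
  intro cacheSize cities _
  unfold Spec_solution solution solution_alt
  have h0 : LRUInv cacheSize (0, []) (0, PySem.Dict.empty, 0) := by
    refine ⟨rfl, [], ?_, rfl, by simp, by simp, by simp, by simp⟩
    simp [PySem.Dict.empty]
  exact (fold_inv cacheSize cities _ _ h0).1
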